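-- pv_equiv track=rewrite | github.com/zdan2/paper_to_gdrive_split | pipeline_common.py | choose_export_format
-- ===== SOURCE A (Python) =====
-- from typing import Dict, Iterable, List, Optional, Sequence, Tuple
--
-- def choose_export_format(default_format: Optional[str], options: Sequence[str], preferred: Optional[str]) -> Optional[str]:
--     """
--     Dropbox の export_format は実際の値がアカウントやファイル種別で異なることがあるため、
--     ここでは完全一致→部分一致の順で緩く選びます。
--     選べなければ None を返して Dropbox 側のデフォルト形式に委ねます。
--     """
--     if not preferred:
--         return None
--
--     preferred_lower = preferred.strip().lower()
--     candidates = [c for c in options if c]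
--     if default_format:
--         candidates = [default_format, *candidates]
--
--     # 1) exact match
--     for value in candidates:
--         if value.lower() == preferred_lower:
--             return value
--
--     # 2) suffix / token match
--     aliases = {
--         "docx": ["docx", "wordprocessingml"],
--         "html": ["html"],
--         "markdown": ["markdown", "md"],
--         "md": ["markdown", "md"],
--         "pdf": ["pdf"],
--         "txt": ["plain", "text/plain", "txt"],
--         "rtf": ["rtf"],
--     }
--     tokens = aliases.get(preferred_lower, [preferred_lower])
--     for value in candidates:
--         lv = value.lower()
--         if any(token in lv for token in tokens):
--             return value
--
--     return None
-- ===== SOURCE B (Python) =====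
-- def choose_export_format(default_format, options, preferred):
--     """Score every candidate (0 = exact, 1 = alias, 2 = no match) and select the
--     minimum (rank, index) pair, so one scoring pass + min replaces staged scans."""
--     if not preferred:
--         return None
--     pl = preferred.strip().lower()
--     candidates = [c for c in options if c]
--     if default_format:
--         candidates = [default_format, *candidates]
--     aliases = {
--         "docx": ["docx", "wordprocessingml"],
--         "html": ["html"],
--         "markdown": ["markdown", "md"],
--         "md": ["markdown", "md"],
--         "pdf": ["pdf"],
--         "txt": ["plain", "text/plain", "txt"],
--         "rtf": ["rtf"],
--     }
--     tokens = aliases.get(pl, [pl])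
--
--     def rank(v):
--         lv = v.lower()
--         if lv == pl:
--             return 0
--         if any(t in lv for t in tokens):
--             return 1
--         return 2
--
--     best = (2, 0)
--     for i, v in enumerate(candidates):
--         p = (rank(v), i)
--         if p < best:
--             best = p
--     return candidates[best[1]] if best[0] < 2 else None
-- ===== Notes on version B (the rewrite author's own statement) =====
-- stated objective: alternative
-- what changed: Replaces A's two staged scans (exact pass, then alias pass) with a rank-and-select algorithm: every candidate is scored once (0 exact, 1 alias, 2 none) and the minimal (rank, index) pair is selected, then the winning candidate is looked up by index.
import Mathlib
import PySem

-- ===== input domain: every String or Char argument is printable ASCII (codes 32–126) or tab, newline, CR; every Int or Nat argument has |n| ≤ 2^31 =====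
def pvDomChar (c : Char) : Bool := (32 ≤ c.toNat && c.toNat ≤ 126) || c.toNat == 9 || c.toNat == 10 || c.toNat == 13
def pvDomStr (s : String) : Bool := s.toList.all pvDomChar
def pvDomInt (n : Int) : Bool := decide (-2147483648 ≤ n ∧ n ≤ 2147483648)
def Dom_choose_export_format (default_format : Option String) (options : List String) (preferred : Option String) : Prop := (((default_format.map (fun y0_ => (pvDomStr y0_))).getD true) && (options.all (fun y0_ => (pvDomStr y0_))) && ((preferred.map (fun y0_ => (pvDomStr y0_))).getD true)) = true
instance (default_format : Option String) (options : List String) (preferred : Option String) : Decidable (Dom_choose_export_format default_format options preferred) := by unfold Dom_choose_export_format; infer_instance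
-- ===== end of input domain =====

-- B replaces A's two staged scans with a rank-and-select pass (score each candidate,
-- pick the minimal (rank,index) pair); return value only, no speed claim.


-- ===== PORT A =====
-- A's first loop: return the first candidate whose lowercase equals preferred_lower
def pvExactLoop (pl : String) : List String → Option String
  | [] => none
  | v :: rest => if PySem.Str.lower v == pl then some v else pvExactLoop pl rest

-- A's second loop: return the first candidate whose lowercase contains some alias token
def pvAliasLoop (tokens : List String) : List String → Option String
  | [] => none
  | v :: rest =>
    let lv := PySem.Str.lower v
    if tokens.any (fun token => PySem.Str.isIn token lv) then some v
    else pvAliasLoop tokens rest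

def pvAliases : PySem.Dict String (List String) :=
  PySem.Dict.ofList
    [ ("docx", ["docx", "wordprocessingml"])
    , ("html", ["html"])
    , ("markdown", ["markdown", "md"])
    , ("md", ["markdown", "md"])
    , ("pdf", ["pdf"])
    , ("txt", ["plain", "text/plain", "txt"])
    , ("rtf", ["rtf"]) ]

def pvCandidates (default_format : Option String) (options : List String) : List String :=
  let cands := options.filter (fun c => !(c == ""))
  match default_format with
  | some d => if d == "" then cands else d :: cands
  | none => cands

def choose_export_format (default_format : Option String) (options : List String) (preferred : Option String) : Option String :=
  match preferred with
  | none => none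
  | some p =>
    if p == "" then none
    else
      let preferred_lower := PySem.Str.lower (PySem.Str.strip p)
      let candidates := pvCandidates default_format options
      match pvExactLoop preferred_lower candidates with
      | some v => some v
      | none =>
        let tokens := PySem.Dict.getD pvAliases preferred_lower [preferred_lower]
        pvAliasLoop tokens candidates

-- ===== PORT B =====
-- B's rank function: 0 = exact match, 1 = alias/token match, 2 = no match
def pvRank (pl : String) (tokens : List String) (v : String) : Nat :=
  let lv := PySem.Str.lower v
  if lv == pl then 0
  else if tokens.any (fun t => PySem.Str.isIn t lv) then 1
  else 2

-- Python tuple comparison 'p < best' on (rank, index), keeping the smaller pair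
def pvMinPair (best p : Nat × Int) : Nat × Int :=
  if p.1 < best.1 ∨ (p.1 = best.1 ∧ p.2 < best.2) then p else best

def pvAliasesAlt : PySem.Dict String (List String) :=
  PySem.Dict.ofList
    [ ("docx", ["docx", "wordprocessingml"])
    , ("html", ["html"])
    , ("markdown", ["markdown", "md"])
    , ("md", ["markdown", "md"])
    , ("pdf", ["pdf"])
    , ("txt", ["plain", "text/plain", "txt"])
    , ("rtf", ["rtf"]) ]

def choose_export_format_alt (default_format : Option String) (options : List String) (preferred : Option String) : Option String :=
  match preferred with
  | none => none
  | some p =>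
    if p == "" then none
    else
      let pl := PySem.Str.lower (PySem.Str.strip p)
      let candidates :=
        let cands := options.filter (fun c => !(c == ""))
        match default_format with
        | some d => if d == "" then cands else d :: cands
        | none => cands
      let tokens := PySem.Dict.getD pvAliasesAlt pl [pl]
      let best := (PySem.List.enumerate candidates 0).foldl
        (fun acc iv => pvMinPair acc (pvRank pl tokens iv.2, iv.1)) (2, 0)
      -- candidates[best[1]]: in-range whenever best.1 < 2, so pyGet? returns the element
      if best.1 < 2 then PySem.List.pyGet? candidates best.2 else none

-- ===== PRECONDITION & SPEC =====
def Spec_choose_export_format (default_format : Option String) (options : List String) (preferred : Option String) (out : Option String) : Prop := out = choose_export_format_alt default_format options preferred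
instance (default_format : Option String) (options : List String) (preferred : Option String) (out : Option String) : Decidable (Spec_choose_export_format default_format options preferred out) := by unfold Spec_choose_export_format; infer_instance

-- ===== CLAIM =====
def Claim_equal_choose_export_format : Prop := ∀ (default_format : Option String) (options : List String) (preferred : Option String), Dom_choose_export_format default_format options preferred → Spec_choose_export_format default_format options preferred (choose_export_format default_format options preferred)

-- ===== LEMMAS AND PROOFS =====
-- Proof-side helper: first index (starting at n) with its value satisfying P
def pvFind (P : String → Bool) : List String → Int → Option (Int × String)
  | [], _ => none
  | v :: rest, n => if P v then some (n, v) else pvFind P rest (n + 1)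

theorem pvFind_exactLoop (pl : String) :
    ∀ (cands : List String) (n : Int),
      pvExactLoop pl cands = (pvFind (fun v => PySem.Str.lower v == pl) cands n).map (·.2) := by
  intro cands
  induction cands with
  | nil => intro n; rfl
  | cons v rest ih =>
    intro n
    simp only [pvExactLoop, pvFind]
    by_cases h : (PySem.Str.lower v == pl) = true
    · rw [if_pos h, if_pos h]; rfl
    · rw [if_neg h, if_neg h]; exact ih (n + 1)

theorem pvFind_aliasLoop (tokens : List String) :
    ∀ (cands : List String) (n : Int),
      pvAliasLoop tokens cands =
        (pvFind (fun v => tokens.any (fun t => PySem.Str.isIn t (PySem.Str.lower v))) cands n).map (·.2) := by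
  intro cands
  induction cands with
  | nil => intro n; rfl
  | cons v rest ih =>
    intro n
    simp only [pvAliasLoop, pvFind]
    by_cases h : (tokens.any (fun t => PySem.Str.isIn t (PySem.Str.lower v))) = true
    · rw [if_pos h, if_pos h]; rfl
    · rw [if_neg h, if_neg h]; exact ih (n + 1)

-- the found index points to the found value within the list
theorem pvFind_get (P : String → Bool) :
    ∀ (cands : List String) (n j : Int) (v : String),
      pvFind P cands n = some (j, v) → n ≤ j ∧ PySem.List.pyGet? cands (j - n) = some v := by
  intro cands
  induction cands with
  | nil => intro n j v h; simp [pvFind] at h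
  | cons x rest ih =>
    intro n j v h
    simp only [pvFind] at h
    by_cases hx : P x = true
    · rw [if_pos hx] at h
      obtain ⟨h1, h2⟩ : n = j ∧ x = v := by
        have := Option.some.inj h; exact ⟨congrArg Prod.fst this, congrArg Prod.snd this⟩
      subst h1; subst h2
      refine ⟨le_refl _, ?_⟩
      rw [show n - n = (0:Int) by omega]; exact PySem.List.pyGet?_zero_cons x rest
    · rw [if_neg hx] at h
      obtain ⟨hle, hget⟩ := ih (n + 1) j v h
      refine ⟨by omega, ?_⟩
      rw [PySem.List.pyGet?_of_nonneg (h := by omega)] at hget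
      rw [PySem.List.pyGet?_of_nonneg (h := by omega)]
      have ht : (j - n).toNat = (j - (n + 1)).toNat + 1 := by omega
      rw [ht, List.getElem?_cons_succ]
      exact hget

-- The fold over enumerate, generalized over predicates, starting index and accumulator
theorem pvFold_spec (rank : String → Nat) (Pe Pa : String → Bool)
    (hR : ∀ v, rank v = if Pe v then 0 else if Pa v then 1 else 2) :
    ∀ (cands : List String) (n : Int) (r : Nat) (i : Int), i ≤ n → r ≤ 2 →
      (PySem.List.enumerate cands n).foldl
        (fun acc iv => pvMinPair acc (rank iv.2, iv.1)) (r, i) =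
        (match pvFind Pe cands n with
         | some (j, _) => if 0 < r then (0, j) else (r, i)
         | none =>
           match pvFind Pa cands n with
           | some (j, _) => if 1 < r then (1, j) else (r, i)
           | none => (r, i)) := by
  intro cands
  induction cands with
  | nil => intro n r i _ _; rfl
  | cons v rest ih =>
    intro n r i hle hr2
    rw [PySem.List.enumerate_cons, List.foldl_cons]
    simp only [pvFind]
    by_cases hPe : Pe v = true
    · have hrank : rank v = 0 := by simp [hR, hPe]
      rw [if_pos hPe]
      by_cases hr : 0 < r
      · have hmin : pvMinPair (r, i) (rank v, n) = (0, n) := by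
          simp [pvMinPair, hrank, hr]
        rw [hmin, ih (n + 1) 0 n (by omega) (by omega)]
        rcases pvFind Pe rest (n + 1) with _ | ⟨j, w⟩
        · rcases pvFind Pa rest (n + 1) with _ | ⟨j, w⟩ <;> simp [hr]
        · simp [hr]
      · have hr0 : r = 0 := by omega
        have hmin : pvMinPair (r, i) (rank v, n) = (r, i) := by
          simp [pvMinPair, hrank, hr0]; omega
        rw [hmin, ih (n + 1) r i (by omega) hr2]
        rcases pvFind Pe rest (n + 1) with _ | ⟨j, w⟩
        · rcases pvFind Pa rest (n + 1) with _ | ⟨j, w⟩ <;> simp [hr0]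
        · simp [hr0]
    · rw [if_neg hPe]
      by_cases hPa : Pa v = true
      · have hrank : rank v = 1 := by simp [hR, hPe, hPa]
        rw [if_pos hPa]
        by_cases hr : 1 < r
        · have hmin : pvMinPair (r, i) (rank v, n) = (1, n) := by
            simp [pvMinPair, hrank, hr]
          rw [hmin, ih (n + 1) 1 n (by omega) (by omega)]
          have hr0 : 0 < r := by omega
          rcases pvFind Pe rest (n + 1) with _ | ⟨j, w⟩
          · rcases pvFind Pa rest (n + 1) with _ | ⟨j, w⟩ <;> simp [hr]
          · simp [hr0]
        · have hmin : pvMinPair (r, i) (rank v, n) = (r, i) := by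
            simp [pvMinPair, hrank]; omega
          rw [hmin, ih (n + 1) r i (by omega) hr2]
          rcases pvFind Pe rest (n + 1) with _ | ⟨j, w⟩
          · rcases pvFind Pa rest (n + 1) with _ | ⟨j, w⟩ <;> simp [hr]
          · simp
      · have hrank : rank v = 2 := by simp [hR, hPe, hPa]
        rw [if_neg hPa]
        have hmin : pvMinPair (r, i) (rank v, n) = (r, i) := by
          simp [pvMinPair, hrank]; omega
        rw [hmin, ih (n + 1) r i (by omega) hr2]

-- tokens come from structurally identical dicts
theorem pvAliases_eq : pvAliasesAlt = pvAliases := rfl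

-- pvRank is the staged if over the two predicates
theorem pvRank_eq (pl : String) (tokens : List String) (v : String) :
    pvRank pl tokens v =
      if (PySem.Str.lower v == pl) then 0
      else if (tokens.any (fun t => PySem.Str.isIn t (PySem.Str.lower v))) then 1 else 2 := rfl

-- core: A's two staged loops equal B's rank-and-select over the same candidates
theorem pvMain (pl : String) (tokens : List String) (cands : List String) :
    (match pvExactLoop pl cands with
     | some v => some v
     | none => pvAliasLoop tokens cands) =
    (let best := (PySem.List.enumerate cands 0).foldl
        (fun acc iv => pvMinPair acc (pvRank pl tokens iv.2, iv.1)) (2, 0);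
     if best.1 < 2 then PySem.List.pyGet? cands best.2 else none) := by
  simp only []
  rw [pvFold_spec (pvRank pl tokens)
        (fun v => PySem.Str.lower v == pl)
        (fun v => tokens.any (fun t => PySem.Str.isIn t (PySem.Str.lower v)))
        (pvRank_eq pl tokens) cands 0 2 0 (by omega) (by omega)]
  rw [pvFind_exactLoop pl cands 0, pvFind_aliasLoop tokens cands 0]
  cases hE : pvFind (fun v => PySem.Str.lower v == pl) cands 0 with
  | some jv =>
    rcases jv with ⟨j, w⟩
    obtain ⟨_, hget⟩ := pvFind_get _ cands 0 j w hE
    rw [show j - 0 = j by omega] at hget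
    simpa using hget.symm
  | none =>
    cases hA : pvFind (fun v => tokens.any (fun t => PySem.Str.isIn t (PySem.Str.lower v))) cands 0 with
    | some jv =>
      rcases jv with ⟨j, w⟩
      obtain ⟨_, hget⟩ := pvFind_get _ cands 0 j w hA
      rw [show j - 0 = j by omega] at hget
      simpa using hget.symm
    | none => simp

-- ===== VERDICT =====
theorem choose_export_format_spec : Claim_equal_choose_export_format := by
  intro df options pref _
  unfold Spec_choose_export_format choose_export_format choose_export_format_alt
  cases pref with
  | none => rfl
  | some p =>
    by_cases hp : (p == "") = true
    · simp [hp]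
    · simp only [hp, if_false, Bool.false_eq_true]
      rw [pvAliases_eq.symm]
      exact pvMain _ _ _
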